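-- pv_equiv track=rewrite | github.com/jffbrwn2/entailment-trees | agent_system/hypergraph/evaluator.py | _validate_evidence_format
-- ===== SOURCE A (Python) =====
-- from typing import Optional
--
-- def _validate_evidence_format(evidence_item: dict) -> tuple[bool, Optional[str]]:
--     """
--     Validate evidence item format according to hypergraph schema.
--
--     Args:
--         evidence_item: Evidence dictionary to validate
--
--     Returns:
--         Tuple of (is_valid, error_message)
--     """
--     # Check type field
--     if 'type' not in evidence_item:
--         return False, "Missing required field 'type'"
--
--     evidence_type = evidence_item['type']
--     allowed_types = ['simulation', 'literature', 'calculation']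
--
--     if evidence_type not in allowed_types:
--         return False, f"Invalid evidence type '{evidence_type}'. Must be one of: {', '.join(allowed_types)}"
--
--     # Type-specific validation
--     if evidence_type == 'simulation':
--         required = ['source', 'lines']  # code is loaded on-demand from source:lines
--         for field in required:
--             if field not in evidence_item:
--                 return False, f"Simulation evidence missing required field '{field}'"
--
--     elif evidence_type == 'literature':
--         required = ['source', 'reference_text']
--         for field in required:
--             if field not in evidence_item:
--                 return False, f"Literature evidence missing required field '{field}'"
--
--     elif evidence_type == 'calculation':
--         required = ['equations', 'program']
--         for field in required:
--             if field not in evidence_item: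
--                 return False, f"Calculation evidence missing required field '{field}'"
--
--     return True, None
-- ===== SOURCE B (Python) =====
-- from typing import Optional
--
-- # Flat rule table: the schema as a list of (type, required_field) pairs.
-- _SPEC = [
--     ('simulation', 'source'), ('simulation', 'lines'),
--     ('literature', 'source'), ('literature', 'reference_text'),
--     ('calculation', 'equations'), ('calculation', 'program'),
-- ]
--
-- def _validate_evidence_format(evidence_item: dict) -> tuple[bool, Optional[str]]:
--     if 'type' not in evidence_item:
--         return False, "Missing required field 'type'"
--     evidence_type = evidence_item['type']
--     if all(evidence_type != t for t, _ in _SPEC):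
--         allowed = []
--         for t, _ in _SPEC:
--             if t not in allowed:
--                 allowed.append(t)
--         return False, f"Invalid evidence type '{evidence_type}'. Must be one of: {', '.join(allowed)}"
--     err = next((f"{evidence_type.capitalize()} evidence missing required field '{f}'"
--                 for t, f in _SPEC if t == evidence_type and f not in evidence_item), None)
--     return err is None, err
-- ===== Notes on version B (the rewrite author's own statement) =====
-- stated objective: alternative
-- what changed: Replaces the three per-type if/elif branches and their separate loops by one flat list of (type, field) rule pairs: type validity is a scan over that table, the allowed-types message is computed by deduplicating the table's first components, and the error is the first rule matching the type whose field is absent, found in a single filtered scan.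
import Mathlib
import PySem

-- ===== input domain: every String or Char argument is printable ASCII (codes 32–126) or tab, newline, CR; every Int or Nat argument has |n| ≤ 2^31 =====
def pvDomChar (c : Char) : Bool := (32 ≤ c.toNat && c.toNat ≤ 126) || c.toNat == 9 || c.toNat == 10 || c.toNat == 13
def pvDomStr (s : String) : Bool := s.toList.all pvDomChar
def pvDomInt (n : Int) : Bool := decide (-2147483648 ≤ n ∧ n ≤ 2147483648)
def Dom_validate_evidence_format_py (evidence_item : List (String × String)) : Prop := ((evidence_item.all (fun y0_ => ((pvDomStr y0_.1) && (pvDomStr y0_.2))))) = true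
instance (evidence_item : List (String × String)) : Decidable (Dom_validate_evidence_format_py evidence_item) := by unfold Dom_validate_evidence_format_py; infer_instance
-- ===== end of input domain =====

-- B replaces A's three per-type if/elif branches and their separate loops by one flat
-- (type, field) rule table scanned in a single filtered pass (objective: alternative).
-- Return-value equivalence only; neither program mutates its argument.

-- ===== PORT A =====
-- the 'for field in required: if field not in evidence_item: return …' loop of each branch,
-- with that branch's capitalized prefix literal passed in
def pvLoopA (d : PySem.Dict String String) (pre : String) : List String → Option String
  | [] => none
  | f :: rest =>
    if d.contains f then pvLoopA d pre rest
    else some (pre ++ " evidence missing required field '" ++ f ++ "'")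

def validate_evidence_format_py (evidence_item : List (String × String)) : Bool × Option String :=
  let d : PySem.Dict String String := PySem.Dict.mk evidence_item
  match PySem.Dict.get? d "type" with
  | none => (false, some "Missing required field 'type'")
  | some evidence_type =>
    let allowed_types : List String := ["simulation", "literature", "calculation"]
    if ¬ allowed_types.contains evidence_type then
      (false, some ("Invalid evidence type '" ++ evidence_type ++ "'. Must be one of: " ++ PySem.Str.join ", " allowed_types))
    else if evidence_type = "simulation" then
      match pvLoopA d "Simulation" ["source", "lines"] with
      | some e => (false, some e)
      | none => (true, none)
    else if evidence_type = "literature" then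
      match pvLoopA d "Literature" ["source", "reference_text"] with
      | some e => (false, some e)
      | none => (true, none)
    else if evidence_type = "calculation" then
      match pvLoopA d "Calculation" ["equations", "program"] with
      | some e => (false, some e)
      | none => (true, none)
    else (true, none)

-- ===== PORT B =====
-- the flat rule table _SPEC of Source B
def pvSpec : List (String × String) :=
  [("simulation", "source"), ("simulation", "lines"),
   ("literature", "source"), ("literature", "reference_text"),
   ("calculation", "equations"), ("calculation", "program")]

-- str.capitalize(), hand-ported (no PySem primitive): uppercase first char, lowercase the rest — exact on ASCII
def pvCapitalize (s : String) : String :=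
  match s.toList with
  | [] => ""
  | c :: rest => String.ofList (PySem.Chars.upper [c] ++ PySem.Chars.lower rest)

-- the dedup loop building 'allowed' from the rule table's first components
def pvAllowed (spec : List (String × String)) : List String :=
  spec.foldl (fun acc p => if acc.contains p.1 then acc else acc ++ [p.1]) []

-- the 'next(… for t, f in _SPEC if t == evidence_type and f not in evidence_item)' scan
def pvScanMissing (d : PySem.Dict String String) (t : String) : List (String × String) → Option String
  | [] => none
  | (st, f) :: rest =>
    if st = t ∧ ¬ d.contains f then
      some (pvCapitalize t ++ " evidence missing required field '" ++ f ++ "'")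
    else pvScanMissing d t rest

def validate_evidence_format_py_alt (evidence_item : List (String × String)) : Bool × Option String :=
  let d : PySem.Dict String String := PySem.Dict.mk evidence_item
  match PySem.Dict.get? d "type" with
  | none => (false, some "Missing required field 'type'")
  | some evidence_type =>
    if pvSpec.all (fun p => evidence_type ≠ p.1) then
      (false, some ("Invalid evidence type '" ++ evidence_type ++ "'. Must be one of: " ++ PySem.Str.join ", " (pvAllowed pvSpec)))
    else
      let err := pvScanMissing d evidence_type pvSpec
      (err.isNone, err)

-- ===== PRECONDITION & SPEC =====
def Spec_validate_evidence_format_py (evidence_item : List (String × String)) (out : Bool × Option String) : Prop := out = validate_evidence_format_py_alt evidence_item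
instance (evidence_item : List (String × String)) (out : Bool × Option String) : Decidable (Spec_validate_evidence_format_py evidence_item out) := by unfold Spec_validate_evidence_format_py; infer_instance

-- ===== CLAIM (what is proved, stated in full; the proofs are below) =====
def Claim_equal_validate_evidence_format_py : Prop := ∀ (evidence_item : List (String × String)), Dom_validate_evidence_format_py evidence_item → Spec_validate_evidence_format_py evidence_item (validate_evidence_format_py evidence_item)

-- ===== LEMMAS AND PROOFS =====

-- B's filtered scan over the full table, at each concrete type, equals A's per-branch loop
theorem scan_simulation (d : PySem.Dict String String) :
    pvScanMissing d "simulation" pvSpec = pvLoopA d "Simulation" ["source", "lines"] := by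
  simp only [pvSpec, pvScanMissing, pvLoopA]
  by_cases h1 : d.contains "source" <;> by_cases h2 : d.contains "lines" <;>
    simp [h1, h2] <;> decide

theorem scan_literature (d : PySem.Dict String String) :
    pvScanMissing d "literature" pvSpec = pvLoopA d "Literature" ["source", "reference_text"] := by
  simp only [pvSpec, pvScanMissing, pvLoopA]
  by_cases h1 : d.contains "source" <;> by_cases h2 : d.contains "reference_text" <;>
    simp [h1, h2] <;> decide

theorem scan_calculation (d : PySem.Dict String String) :
    pvScanMissing d "calculation" pvSpec = pvLoopA d "Calculation" ["equations", "program"] := by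
  simp only [pvSpec, pvScanMissing, pvLoopA]
  by_cases h1 : d.contains "equations" <;> by_cases h2 : d.contains "program" <;>
    simp [h1, h2] <;> decide

-- ===== VERDICT (by name: the statement is the Claim_ definition above) =====
theorem validate_evidence_format_py_spec : Claim_equal_validate_evidence_format_py := by
  intro evidence_item _
  unfold Spec_validate_evidence_format_py validate_evidence_format_py validate_evidence_format_py_alt
  cases h : PySem.Dict.get? (PySem.Dict.mk evidence_item) "type" with
  | none => simp [h]
  | some t =>
    simp only [h]
    by_cases h1 : t = "simulation"
    · subst h1
      rw [if_neg (by decide), if_pos rfl,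
          if_neg (by decide : ¬ pvSpec.all (fun p => ("simulation" : String) ≠ p.1)),
          scan_simulation]
      cases pvLoopA (PySem.Dict.mk evidence_item) "Simulation" ["source", "lines"] <;> rfl
    · by_cases h2 : t = "literature"
      · subst h2
        rw [if_neg (by decide), if_neg h1, if_pos rfl,
            if_neg (by decide : ¬ pvSpec.all (fun p => ("literature" : String) ≠ p.1)),
            scan_literature]
        cases pvLoopA (PySem.Dict.mk evidence_item) "Literature" ["source", "reference_text"] <;> rfl
      · by_cases h3 : t = "calculation"
        · subst h3
          rw [if_neg (by decide), if_neg h1, if_neg h2, if_pos rfl,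
              if_neg (by decide : ¬ pvSpec.all (fun p => ("calculation" : String) ≠ p.1)),
              scan_calculation]
          cases pvLoopA (PySem.Dict.mk evidence_item) "Calculation" ["equations", "program"] <;> rfl
        · have hall : pvSpec.all (fun p => t ≠ p.1) = true := by
            simp [pvSpec]
            exact ⟨h1, h2, h3⟩
          rw [if_pos (by simp [List.contains_eq_mem]; exact ⟨h1, h2, h3⟩), if_pos hall]
          rfl
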